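-- pv_equiv track=rewrite | github.com/sunnweiwei/GenRet | run.py | ress
-- ===== SOURCE A (Python) =====
-- from collections import defaultdict
--
-- def ress(code, prefix=None):
--     if prefix is not None:
--         prefix = [str(x) for x in prefix]
--         code = [f'{p}{c}' for c, p in zip(code, prefix)]
--     freq_count = defaultdict(int)
--     for c in code:
--         freq_count[c] += 1
--     freq_count = [y for x, y in freq_count.items()]
--     freq_count.sort()
--     return freq_count
-- ===== SOURCE B (Python) =====
-- def ress(code, prefix=None):
--     if prefix is not None:
--         prefix = [str(x) for x in prefix]
--         code = [f'{p}{c}' for c, p in zip(code, prefix)]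
--     s = sorted(code)
--     if not s:
--         return []
--     counts = []
--     prev, run = s[0], 1
--     for c in s[1:]:
--         if c == prev:
--             run += 1
--         else:
--             counts.append(run)
--             prev, run = c, 1
--     counts.append(run)
--     counts.sort()
--     return counts
-- ===== Notes on version B (the rewrite author's own statement) =====
-- stated objective: alternative
-- what changed: Replaces the defaultdict frequency map with sort-then-scan: sort a copy of the list and count lengths of maximal runs of equal consecutive elements, then sort the counts.
import Mathlib
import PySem

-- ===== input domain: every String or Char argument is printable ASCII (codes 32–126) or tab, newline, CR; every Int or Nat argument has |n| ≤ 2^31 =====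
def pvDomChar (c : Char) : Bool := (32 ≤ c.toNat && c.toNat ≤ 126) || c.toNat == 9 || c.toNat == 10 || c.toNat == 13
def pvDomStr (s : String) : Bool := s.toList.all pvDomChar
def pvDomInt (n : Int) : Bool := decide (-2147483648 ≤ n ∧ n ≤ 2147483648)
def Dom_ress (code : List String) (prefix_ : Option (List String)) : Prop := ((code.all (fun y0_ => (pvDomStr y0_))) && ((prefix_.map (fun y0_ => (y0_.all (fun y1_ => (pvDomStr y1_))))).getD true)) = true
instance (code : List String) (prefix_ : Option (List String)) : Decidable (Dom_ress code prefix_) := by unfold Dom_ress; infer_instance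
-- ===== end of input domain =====

-- B replaces the defaultdict frequency map with sort-then-scan: it sorts a copy of the list and
-- counts the lengths of maximal runs of equal consecutive elements, then sorts the counts.
-- (A does not mutate its arguments, and neither does B: Source B sorts a copy.)

-- ===== PORT A =====
-- prefix step: str(x) on a str is the identity; f'{p}{c}' is string concatenation
def ress (code : List String) (prefix_ : Option (List String)) : List Int :=
  let code' : List String :=
    match prefix_ with
    | some pre => ((code.zip (pre.map (fun x => x))).map (fun cp => cp.2 ++ cp.1))
    | none => code
  -- defaultdict(int) counting loop: freq_count[c] += 1
  let freq := code'.foldl (fun d c => d.insert c (d.getD c 0 + 1)) (PySem.Dict.empty : PySem.Dict String Int)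
  -- [y for x, y in freq_count.items()], then .sort()
  PySem.List.sorted (freq.items.map (fun xy => xy.2)) (fun y => y) false

-- ===== PORT B =====
-- the run-counting loop of Source B: prev/run are the loop state, counts is emitted in order
def runsGo (prev : String) (run : Int) : List String → List Int
  | [] => [run]
  | c :: t => if c == prev then runsGo prev (run + 1) t else run :: runsGo c 1 t

def ress_alt (code : List String) (prefix_ : Option (List String)) : List Int :=
  let code' : List String :=
    match prefix_ with
    | some pre => ((code.zip (pre.map (fun x => x))).map (fun cp => cp.2 ++ cp.1))
    | none => code
  -- s = sorted(code)
  match PySem.List.sorted code' (fun x => x) false with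
  | [] => []                       -- if not s: return []
  | prev :: t => PySem.List.sorted (runsGo prev 1 t) (fun y => y) false   -- run scan, then counts.sort()

-- ===== PRECONDITION & SPEC =====
def Spec_ress (code : List String) (prefix_ : Option (List String)) (out : List Int) : Prop := out = ress_alt code prefix_
instance (code : List String) (prefix_ : Option (List String)) (out : List Int) : Decidable (Spec_ress code prefix_ out) := by unfold Spec_ress; infer_instance

-- ===== CLAIM (what is proved, stated in full; the proofs are below) =====
def Claim_equal_ress : Prop := ∀ (code : List String) (prefix_ : Option (List String)), Dom_ress code prefix_ → Spec_ress code prefix_ (ress code prefix_)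

-- ===== LEMMAS AND PROOFS =====

-- first occurrences of a list, as a simple recursion (proof-side mirror of Set.ofList)
def firstsOf (l : List String) : List String :=
  match l with
  | [] => []
  | a :: t => a :: firstsOf (t.filter (fun x => !(x == a)))
termination_by l.length
decreasing_by
  simpa using Nat.lt_succ_of_le (le_trans (List.length_filter_le _ _) (by simp))

theorem firstsOf_nil : firstsOf [] = [] := by
  rw [firstsOf.eq_def]

theorem firstsOf_cons (a : String) (t : List String) :
    firstsOf (a :: t) = a :: firstsOf (t.filter (fun x => !(x == a))) := by
  rw [firstsOf.eq_def]

theorem mem_firstsOf_aux : ∀ (n : Nat) (l : List String), l.length ≤ n →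
    ∀ x : String, (x ∈ firstsOf l ↔ x ∈ l) := by
  intro n
  induction n with
  | zero =>
    intro l hl x
    have : l = [] := List.length_eq_zero_iff.mp (Nat.le_zero.mp hl)
    subst this; simp [firstsOf_nil]
  | succ n ih =>
    intro l hl x
    cases l with
    | nil => simp [firstsOf_nil]
    | cons a t =>
      rw [firstsOf_cons]
      have hlen : (t.filter (fun x => !(x == a))).length ≤ n :=
        le_trans (List.length_filter_le _ _) (Nat.le_of_succ_le_succ hl)
      by_cases hxa : x = a
      · simp [hxa]
      · simp only [List.mem_cons, hxa, false_or]
        rw [ih _ hlen x]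
        simp [hxa]

theorem mem_firstsOf (x : String) (l : List String) : x ∈ firstsOf l ↔ x ∈ l :=
  mem_firstsOf_aux l.length l (Nat.le_refl _) x

theorem nodup_firstsOf_aux : ∀ (n : Nat) (l : List String), l.length ≤ n →
    (firstsOf l).Nodup := by
  intro n
  induction n with
  | zero =>
    intro l hl
    have : l = [] := List.length_eq_zero_iff.mp (Nat.le_zero.mp hl)
    subst this; simp [firstsOf_nil]
  | succ n ih =>
    intro l hl
    cases l with
    | nil => simp [firstsOf_nil]
    | cons a t =>
      rw [firstsOf_cons]
      have hlen : (t.filter (fun x => !(x == a))).length ≤ n :=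
        le_trans (List.length_filter_le _ _) (Nat.le_of_succ_le_succ hl)
      refine List.nodup_cons.mpr ⟨?_, ih _ hlen⟩
      rw [mem_firstsOf]
      simp

theorem nodup_firstsOf (l : List String) : (firstsOf l).Nodup :=
  nodup_firstsOf_aux l.length l (Nat.le_refl _)

-- unfolding firstsOf-mapped counts at the head of a list
theorem firstsOf_map_count_cons (prev : String) (t : List String) :
    (firstsOf (prev :: t)).map (fun c => (((prev :: t).count c : Nat) : Int))
      = ((1 + t.count prev : Nat) : Int)
          :: (firstsOf (t.filter (fun x => !(x == prev)))).map
               (fun c => (((t.filter (fun x => !(x == prev))).count c : Nat) : Int)) := by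
  rw [firstsOf_cons, List.map_cons]
  congr 1
  · simp [Nat.add_comm]
  · apply List.map_congr_left
    intro d hd
    have hdmem : d ∈ t.filter (fun x => !(x == prev)) := (mem_firstsOf d _).mp hd
    have hdne : d ≠ prev := by
      have := List.of_mem_filter hdmem
      simpa using this
    have h1 : (prev :: t).count d = t.count d := by
      rw [List.count_cons]
      simp [Ne.symm hdne]
    have h2 : (t.filter (fun x => !(x == prev))).count d = t.count d := by
      rw [List.count_filter]
      simp [hdne]
    rw [h1, h2]

-- the run-scanning loop on a sorted list starting a run of `prev` already `run` long
theorem runsGo_spec : ∀ (n : Nat) (prev : String) (run : Int) (t : List String),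
    t.length ≤ n → (∀ x ∈ t, prev ≤ x) → t.Pairwise (· ≤ ·) →
    runsGo prev run t
      = (run + (t.count prev : Int))
          :: (firstsOf (t.filter (fun x => !(x == prev)))).map
               (fun c => (((t.filter (fun x => !(x == prev))).count c : Nat) : Int)) := by
  intro n
  induction n with
  | zero =>
    intro prev run t hlen _ _
    have : t = [] := List.length_eq_zero_iff.mp (Nat.le_zero.mp hlen)
    subst this
    simp [runsGo, firstsOf_nil]
  | succ n ih =>
    intro prev run t hlen hge hsorted
    cases t with
    | nil => simp [runsGo, firstsOf_nil]
    | cons c t =>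
      have hlt : t.length ≤ n := Nat.le_of_succ_le_succ hlen
      have hgt : ∀ x ∈ t, c ≤ x := (List.pairwise_cons.mp hsorted).1
      have hst : t.Pairwise (· ≤ ·) := (List.pairwise_cons.mp hsorted).2
      rw [runsGo]
      by_cases hc : c = prev
      · subst hc
        simp only [beq_self_eq_true, if_true]
        rw [ih c (run + 1) t hlt hgt hst]
        congr 1
        · simp
          ring
        · simp
      · have hprevc : prev < c := lt_of_le_of_ne (hge c (by simp)) (Ne.symm hc)
        have hnt : ∀ x ∈ t, x ≠ prev := fun x hx =>
          ne_of_gt (lt_of_lt_of_le hprevc (hgt x hx))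
        have hcount : t.count prev = 0 :=
          List.count_eq_zero.mpr (fun h => hnt prev h rfl)
        have hfilter : t.filter (fun x => !(x == prev)) = t :=
          List.filter_eq_self.mpr (fun x hx => by simpa using hnt x hx)
        have hcne : (c == prev) = false := by simpa using hc
        simp only [hcne, Bool.false_eq_true, if_false]
        rw [ih c 1 t hlt hgt hst]
        have hcfilter : (c :: t).filter (fun x => !(x == prev)) = c :: t := by
          rw [List.filter_cons]
          simp [hcne, hfilter]
        rw [List.count_cons]
        simp only [hcne, hcount, hcfilter]
        rw [firstsOf_map_count_cons c t]
        simp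
-- main bridge: A's dict-values list and B's run-length list are permutations, for any l
theorem values_perm_runs (l : List String) (prev : String) (t : List String)
    (hs : PySem.List.sorted l (fun x => x) false = prev :: t) :
    ((PySem.Set.ofList l).map (fun c => ((l.count c : Nat) : Int))).Perm (runsGo prev 1 t) := by
  have hperm : (prev :: t).Perm l := by
    rw [← hs]; exact PySem.List.sorted_perm l (fun x => x) false
  have hpw : (prev :: t).Pairwise (· ≤ ·) := by
    rw [← hs]; exact PySem.List.sorted_pairwise l (fun x => x)
  have hge : ∀ x ∈ t, prev ≤ x := (List.pairwise_cons.mp hpw).1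
  have hst : t.Pairwise (· ≤ ·) := (List.pairwise_cons.mp hpw).2
  rw [runsGo_spec t.length prev 1 t (Nat.le_refl _) hge hst]
  have h1 : ((1 : Int) + (t.count prev : Int)) = (((1 + t.count prev : Nat) : Nat) : Int) := by
    push_cast; ring
  rw [h1, ← firstsOf_map_count_cons prev t]
  -- counts over prev :: t equal counts over l (they are permutations)
  have hmapeq : (firstsOf (prev :: t)).map (fun c => (((prev :: t).count c : Nat) : Int))
      = (firstsOf (prev :: t)).map (fun c => ((l.count c : Nat) : Int)) := by
    apply List.map_congr_left
    intro d _
    rw [hperm.count_eq d]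
  rw [hmapeq]
  apply List.Perm.map
  -- two nodup lists with the same members
  rw [List.perm_ext_iff_of_nodup (PySem.Set.nodup_ofList l) (nodup_firstsOf _)]
  intro a
  rw [PySem.Set.mem_ofList, mem_firstsOf]
  exact (hperm.mem_iff (a := a)).symm

-- the whole pipeline after the (shared) prefix step agrees
theorem core_eq (l : List String) :
    PySem.List.sorted
        ((l.foldl (fun d c => d.insert c (d.getD c 0 + 1)) (PySem.Dict.empty : PySem.Dict String Int)).items.map (fun xy => xy.2))
        (fun y => y) false
      = match PySem.List.sorted l (fun x => x) false with
        | [] => []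
        | prev :: t => PySem.List.sorted (runsGo prev 1 t) (fun y => y) false := by
  have hvals : ((l.foldl (fun d c => d.insert c (d.getD c 0 + 1)) (PySem.Dict.empty : PySem.Dict String Int)).items.map (fun xy => xy.2))
      = (PySem.Set.ofList l).map (fun c => ((l.count c : Nat) : Int)) := by
    rw [PySem.Dict.foldl_insert_getD_add_one_eq_counter, PySem.Dict.items_counter, List.map_map]
    rfl
  rw [hvals]
  cases hs : PySem.List.sorted l (fun x => x) false with
  | nil =>
    have : l = [] := (PySem.List.sorted_eq_nil_iff l (fun x => x) false).mp hs
    subst this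
    rfl
  | cons prev t =>
    exact (PySem.List.sorted_id_eq_sorted_id_iff_perm _ _).mpr (values_perm_runs l prev t hs)

-- ===== VERDICT (by name: the statement is the Claim_ definition above) =====
theorem ress_spec : Claim_equal_ress := by
  intro code prefix_ _
  unfold Spec_ress ress ress_alt
  cases prefix_ <;> exact core_eq _
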